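-- pv_equiv track=rewrite | github.com/SilasRech/VoiceIsolation | tools.py | divide_interval
-- ===== SOURCE A (Python) =====
-- def divide_interval(num, start, end):
--     """
--     Divides the number of states equally to the number of frames in the interval.
--     :param num:  number of states.
--     :param start: start frame index
--     :param end: end frame index
--     :return starts: start indexes
--     :return end: end indexes
--     """
--     interval_size = end - start
--     # gets remainder
--     remainder = interval_size % num
--     # init sate count per state with min value
--     count = [int((interval_size - remainder) / num)] * num
--     # the remainder is assigned to the first n states
--     count[:remainder] = [x + 1 for x in count[:remainder]]
--     # init starts with first start value
--     starts = [start]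
--     ends = []
--     # iterate over the states and sets start and end values
--     for c in count[:-1]:
--         ends.append(starts[-1] + c)
--         starts.append(ends[-1])
--
--     # set last end value
--     ends.append(starts[-1] + count[-1])
--
--     return starts, ends
-- ===== SOURCE B (Python) =====
-- def divide_interval(num, start, end):
--     interval_size = end - start
--     rem = interval_size % num
--     base = int((interval_size - rem) / num)
--     starts = [start + i * base + min(i, rem) for i in range(num)]
--     ends = [start + (i + 1) * base + min(i + 1, rem) for i in range(num)]
--     return starts, ends
-- ===== Notes on version B (the rewrite author's own statement) =====
-- stated objective: simpler
-- what changed: Replaces the running-total loop that appends each boundary from the previous one with a direct closed-form comprehension computing every start/end from its index (start + i*base + min(i, rem)).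
import Mathlib
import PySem

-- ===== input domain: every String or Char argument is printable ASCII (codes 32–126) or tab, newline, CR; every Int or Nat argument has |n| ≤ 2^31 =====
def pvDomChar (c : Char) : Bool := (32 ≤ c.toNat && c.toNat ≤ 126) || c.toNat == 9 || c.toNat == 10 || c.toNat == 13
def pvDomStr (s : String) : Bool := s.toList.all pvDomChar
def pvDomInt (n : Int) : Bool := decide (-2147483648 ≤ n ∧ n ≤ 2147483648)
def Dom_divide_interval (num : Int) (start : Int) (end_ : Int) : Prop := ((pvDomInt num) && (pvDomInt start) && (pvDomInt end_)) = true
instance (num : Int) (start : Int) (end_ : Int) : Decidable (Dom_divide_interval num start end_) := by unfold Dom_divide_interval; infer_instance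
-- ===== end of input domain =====

-- B replaces A's running-total boundary loop by a closed-form per-index formula (objective: simpler).

-- ===== PORT A =====
-- the 'for c in count[:-1]' loop of A: appends starts[-1] + c to ends and starts
def aLoop (cs : List Int) (starts ends : List Int) : List Int × List Int :=
  match cs with
  | [] => (starts, ends)
  | c :: rest =>
      let e := PySem.List.pyGetD starts (-1) 0 + c
      aLoop rest (starts ++ [e]) (ends ++ [e])


def divide_interval (num : Int) (start : Int) (end_ : Int) : List Int × List Int :=
  let interval_size := end_ - start
  let remainder := PySem.Int.mod interval_size num
  -- int((interval_size - remainder) / num): exact as floor division here, since num divides the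
  -- numerator and |numerator| < 2^53 on Dom, so the float quotient is the exact integer
  let base := PySem.Int.floordiv (interval_size - remainder) num
  let count0 := List.replicate num.toNat base
  -- count[:remainder] = [x + 1 for x in count[:remainder]]  (slice assignment rebuilds the list)
  let count := (PySem.List.slice count0 none (some remainder)).map (· + 1)
               ++ PySem.List.slice count0 (some remainder) none
  let p := aLoop (PySem.List.slice count none (some (-1))) [start] []
  (p.1, p.2 ++ [PySem.List.pyGetD p.1 (-1) 0 + PySem.List.pyGetD count (-1) 0])

-- ===== PORT B =====
def divide_interval_alt (num : Int) (start : Int) (end_ : Int) : List Int × List Int :=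
  let interval_size := end_ - start
  let rem := PySem.Int.mod interval_size num
  let base := PySem.Int.floordiv (interval_size - rem) num
  ((PySem.List.pyRange 0 num 1).map (fun i => start + i * base + min i rem),
   (PySem.List.pyRange 0 num 1).map (fun i => start + (i + 1) * base + min (i + 1) rem))


-- ===== PRECONDITION & SPEC =====
-- Pre_ keeps num ≥ 1: A raises ZeroDivisionError ('%' by num) on num = 0 and IndexError (count[-1] on the empty count) on num < 0.
def Pre_divide_interval (num : Int) (start : Int) (end_ : Int) : Prop := 1 ≤ num
instance (num : Int) (start : Int) (end_ : Int) : Decidable (Pre_divide_interval num start end_) := by unfold Pre_divide_interval; infer_instance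
def pvWitness_divide_interval : Int × Int × Int := (3, 2, 13)

def Spec_divide_interval (num : Int) (start : Int) (end_ : Int) (out : List Int × List Int) : Prop := out = divide_interval_alt num start end_
instance (num : Int) (start : Int) (end_ : Int) (out : List Int × List Int) : Decidable (Spec_divide_interval num start end_ out) := by unfold Spec_divide_interval; infer_instance

-- ===== CLAIM (what is proved, stated in full; the proofs are below) =====
def Claim_equal_divide_interval : Prop := ∀ (num : Int) (start : Int) (end_ : Int), Dom_divide_interval num start end_ → Pre_divide_interval num start end_ → Spec_divide_interval num start end_ (divide_interval num start end_)

-- ===== LEMMAS AND PROOFS =====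

-- prefix sums after L: psum L [c1, c2, …] = [L+c1, L+c1+c2, …]
def psum (L : Int) : List Int → List Int
  | [] => []
  | c :: cs => (L + c) :: psum (L + c) cs

theorem psum_append (L : Int) (cs ds : List Int) :
    psum L (cs ++ ds) = psum L cs ++ psum (L + cs.sum) ds := by
  induction cs generalizing L with
  | nil => simp [psum]
  | cons c cs ih =>
      simp only [List.cons_append, psum, ih, List.sum_cons]
      rw [show L + c + cs.sum = L + (c + cs.sum) by ring]

theorem psum_replicate (L x : Int) (k : Nat) :
    psum L (List.replicate k x) = (PySem.List.pyRange 0 k 1).map (fun j => L + (j + 1) * x) := by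
  induction k generalizing L with
  | zero => simp [psum, PySem.List.pyRange_one_eq_nil]
  | succ k ih =>
      rw [List.replicate_succ', psum_append, ih, List.sum_replicate]
      have : PySem.List.pyRange 0 ((k : Int) + 1) 1 = PySem.List.pyRange 0 k 1 ++ [(k : Int)] :=
        PySem.List.pyRange_one_succ_right (by positivity)
      push_cast
      rw [this, List.map_append]
      simp [psum]
      ring

theorem psum_two_reps (L b : Int) (r m : Nat) :
    psum L (List.replicate r (b + 1) ++ List.replicate m b)
      = (PySem.List.pyRange 0 ((r : Int) + (m : Int)) 1).map
          (fun k => L + (k + 1) * b + min (k + 1) (r : Int)) := by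
  rw [psum_append, List.sum_replicate, psum_replicate, psum_replicate,
      PySem.List.pyRange_one_append 0 (r : Int) ((r : Int) + (m : Int)) (by positivity) (by omega),
      List.map_append]
  congr 1
  · apply List.map_congr_left
    intro j hj
    have hj' := (PySem.List.mem_pyRange_one).mp hj
    have : min (j + 1) (r : Int) = j + 1 := min_eq_left (by omega)
    rw [this]; ring
  · rw [PySem.List.pyRange_one (r : Int) ((r : Int) + (m : Int)),
        PySem.List.pyRange_one 0 (m : Int)]
    simp only [add_sub_cancel_left, sub_zero, Int.toNat_natCast, List.map_map]
    apply List.map_congr_left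
    intro k hk
    have hk' : k < m := List.mem_range.mp hk
    simp only [Function.comp]
    have : min ((r : Int) + (k : Int) + 1) (r : Int) = (r : Int) := min_eq_right (by omega)
    rw [zero_add, this]
    rw [nsmul_eq_mul]; ring

theorem pyGetD_last_of (xs : List Int) (L : Int) (h : xs.getLast? = some L) :
    PySem.List.pyGetD xs (-1) 0 = L := by
  have hne : xs ≠ [] := by rintro rfl; simp at h
  rw [PySem.List.pyGetD_neg_one _ _ hne]
  rw [List.getLast?_eq_some_getLast (h := hne)] at h
  exact Option.some.inj h

theorem aLoop_spec (cs : List Int) (starts ends : List Int) (L : Int)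
    (h : starts.getLast? = some L) :
    aLoop cs starts ends = (starts ++ psum L cs, ends ++ psum L cs) := by
  induction cs generalizing starts ends L with
  | nil => simp [aLoop, psum]
  | cons c rest ih =>
      simp only [aLoop, pyGetD_last_of starts L h]
      rw [ih _ _ (L + c) (by rw [List.getLast?_concat])]
      simp [psum, List.append_assoc]

theorem psum_getLast (L : Int) (cs : List Int) :
    (L :: psum L cs).getLast? = some (L + cs.sum) := by
  induction cs generalizing L with
  | nil => simp [psum]
  | cons c cs ih =>
      simp only [psum, List.getLast?_cons_cons, List.sum_cons]
      have := ih (L + c)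
      cases cs with
      | nil => simp [psum] at this ⊢
      | cons d ds =>
          simp only [psum, List.getLast?_cons_cons] at this ⊢
          rw [this]; congr 1; ring

theorem starts_eq (start b : Int) (r m : Nat) :
    start :: psum start (List.replicate r (b + 1) ++ List.replicate m b)
      = (PySem.List.pyRange 0 ((r : Int) + (m : Int) + 1) 1).map
          (fun i => start + i * b + min i (r : Int)) := by
  rw [psum_two_reps]
  conv_rhs => rw [PySem.List.pyRange_one_cons (show (0:Int) < (r : Int) + (m : Int) + 1 by omega)]
  simp only [List.map_cons]
  congr 1
  · simp
  · rw [PySem.List.pyRange_one (0+1), PySem.List.pyRange_one 0]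
    have e1 : (((r : Int) + (m : Int) + 1) - (0+1)).toNat = r + m := by omega
    have e2 : (((r : Int) + (m : Int)) - 0).toNat = r + m := by omega
    simp only [e1, e2, List.map_map]
    apply List.map_congr_left
    intro k _
    simp only [Function.comp]
    have e3 : (0 : Int) + 1 + (k : Int) = (k : Int) + 1 := by ring
    rw [zero_add, e3]

theorem divide_interval_eq_alt (num start end_ : Int) (hpre : 1 ≤ num) :
    divide_interval num start end_ = divide_interval_alt num start end_ := by
  simp only [divide_interval, divide_interval_alt]
  have h0 : 0 < num := by omega
  set rem := PySem.Int.mod (end_ - start) num with hremdef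
  have hr0 : 0 ≤ rem := PySem.Int.mod_nonneg _ h0
  have hrlt : rem < num := PySem.Int.mod_lt _ h0
  set b := PySem.Int.floordiv (end_ - start - rem) num with hb
  obtain ⟨r, hr⟩ : ∃ r : Nat, rem = (r : Int) := ⟨rem.toNat, by omega⟩
  obtain ⟨m, hm⟩ : ∃ m : Nat, num = (r : Int) + (m : Int) + 1 := ⟨(num - rem - 1).toNat, by omega⟩
  have hnt : num.toNat = r + m + 1 := by omega
  rw [hr, hnt, PySem.List.slice_to_natCast, PySem.List.slice_from_natCast,
      List.take_replicate, List.drop_replicate, List.map_replicate]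
  have hmin : min r (r + m + 1) = r := by omega
  have hsub : r + m + 1 - r = m + 1 := by omega
  rw [hmin, hsub, List.replicate_succ', ← List.append_assoc,
      PySem.List.slice_to_neg_one, List.dropLast_concat,
      aLoop_spec _ _ _ start (by simp)]
  have hlast1 : PySem.List.pyGetD
      ([start] ++ psum start (List.replicate r (b + 1) ++ List.replicate m b)) (-1) 0
      = start + (List.replicate r (b + 1) ++ List.replicate m b).sum := by
    apply pyGetD_last_of
    simpa using psum_getLast start (List.replicate r (b + 1) ++ List.replicate m b)
  rw [PySem.List.pyGetD_neg_one_append_singleton]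
  simp only [List.singleton_append, List.nil_append]
  simp only [Prod.mk.injEq]
  constructor
  · rw [hm, starts_eq]
  · rw [show PySem.List.pyGetD
        (start :: psum start (List.replicate r (b + 1) ++ List.replicate m b)) (-1) 0
        = start + (List.replicate r (b + 1) ++ List.replicate m b).sum from by
          simpa using hlast1]
    rw [show psum start (List.replicate r (b + 1) ++ List.replicate m b)
          ++ [start + (List.replicate r (b + 1) ++ List.replicate m b).sum + b]
        = psum start ((List.replicate r (b + 1) ++ List.replicate m b) ++ [b]) from by
          simp only [psum_append, List.sum_append, List.sum_replicate, nsmul_eq_mul, psum,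
            List.append_assoc]
          ring_nf]
    rw [List.append_assoc, ← List.replicate_succ', psum_two_reps]
    rw [hm]
    apply List.map_congr_left
    intro i _
    ring_nf

-- ===== VERDICT (by name: the statement is the Claim_ definition above) =====
theorem divide_interval_spec : Claim_equal_divide_interval := by
  intro num start end_ _ hpre
  unfold Spec_divide_interval
  exact divide_interval_eq_alt num start end_ hpre
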